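-- pv_equiv track=rewrite | github.com/aorursy/new-nb-2 | dierickx3_ctiii-level-1.py | decrypt_phrase
-- ===== SOURCE A (Python) =====
-- translation = [
--
-- "ABCDEFGHIJKLMNOPQRSTUVWXYabcdefghijklmnopqrstuvwxy",
--
-- "EFGHIJKLMNOPQRSTUVWXYABCDefghijklmnopqrstuvwxyabcd",
--
-- "PQRSTUVWXYABCDEFGHIJKLMNOpqrstuvwxyabcdefghijklmno",
--
-- "YABCDEFGHIJKLMNOPQRSTUVWXyabcdefghijklmnopqrstuvwx",
--
-- "LMNOPQRSTUVWXYABCDEFGHIJKlmnopqrstuvwxyabcdefghijk",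
--
-- ]
--
-- def decrypt_letter(input_char, s):
--
--
--
--     k = s % 4
--
--     retvals = (input_char, 0)
--
--
--
--     if (k == 0):
--
--         k = 4
--
--
--
--     i = translation[k].find(input_char)
--
--
--
--     if (i >= 0):
--
--         out_char = translation[0][i]
--
--         retvals = (out_char, 1)
--
--
--
--     return retvals
--
-- def decrypt_phrase(input_phrase, xstart):
--
--
--
--     return_chars = []
--
--     x = xstart
--
--
--
--     for c in input_phrase:
--
--         (out_char, i) = decrypt_letter(c, x)
--
--         x = x + i
--
--         return_chars.append(out_char)
--
--
--
--     return "".join(return_chars)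
-- ===== SOURCE B (Python) =====
-- def _step(c, x):
--     # Arithmetic Caesar step over the 25-letter alphabets A..Y / a..y:
--     # returns (decoded char, 1) for a table letter, (c, 0) otherwise.
--     if 'A' <= c <= 'Y':
--         base = 65
--     elif 'a' <= c <= 'y':
--         base = 97
--     else:
--         return (c, 0)
--     shift = (11, 4, 15, 24)[x % 4]
--     return (chr(base + (ord(c) - base - shift) % 25), 1)
--
-- def decrypt_phrase(input_phrase, xstart):
--     out = []
--     x = xstart
--     for c in input_phrase:
--         ch, inc = _step(c, x)
--         out.append(ch)
--         x += inc
--     return ''.join(out)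
-- ===== Notes on version B (the rewrite author's own statement) =====
-- stated objective: alternative
-- what changed: Replaces the five-row substitution-table lookup (str.find in a rotated row, then indexing row 0) by a closed-form modular Caesar shift on the 25-letter alphabets A..Y and a..y, with the per-position shift {0:11,1:4,2:15,3:24}[x%4].
import Mathlib
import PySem

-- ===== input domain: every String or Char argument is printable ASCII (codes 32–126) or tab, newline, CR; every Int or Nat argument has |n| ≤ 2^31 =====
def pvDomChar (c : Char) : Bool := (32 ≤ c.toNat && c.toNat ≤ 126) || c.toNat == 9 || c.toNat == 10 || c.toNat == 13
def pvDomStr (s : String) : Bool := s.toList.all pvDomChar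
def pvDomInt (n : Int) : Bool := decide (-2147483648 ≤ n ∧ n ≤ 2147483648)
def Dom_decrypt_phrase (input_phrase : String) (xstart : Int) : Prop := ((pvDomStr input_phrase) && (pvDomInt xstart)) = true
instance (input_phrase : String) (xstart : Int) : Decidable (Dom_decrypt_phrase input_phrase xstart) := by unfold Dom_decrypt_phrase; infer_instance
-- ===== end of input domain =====

-- B replaces A's rotated-table lookup by a closed-form modular Caesar shift (alternative algorithm, same cost class).

-- ===== PORT A =====
def pvTranslation : List String := [
  "ABCDEFGHIJKLMNOPQRSTUVWXYabcdefghijklmnopqrstuvwxy",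
  "EFGHIJKLMNOPQRSTUVWXYABCDefghijklmnopqrstuvwxyabcd",
  "PQRSTUVWXYABCDEFGHIJKLMNOpqrstuvwxyabcdefghijklmno",
  "YABCDEFGHIJKLMNOPQRSTUVWXyabcdefghijklmnopqrstuvwx",
  "LMNOPQRSTUVWXYABCDEFGHIJKlmnopqrstuvwxyabcdefghijk"]

def decrypt_letter (input_char : Char) (s : Int) : Char × Int :=
  let k := PySem.Int.mod s 4
  let retvals := (input_char, (0 : Int))
  let k := if k == 0 then (4 : Int) else k
  -- translation[k] always exists (k ∈ 1..4); .getD "" only totalises the list indexing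
  let i := PySem.Str.find ((PySem.List.pyGet? pvTranslation k).getD "") (String.ofList [input_char])
  if 0 ≤ i then
    let out_char := (PySem.Str.pyGet? ((PySem.List.pyGet? pvTranslation 0).getD "") i).getD input_char
    (out_char, 1)
  else retvals

def pvStepA (st : List Char × Int) (c : Char) : List Char × Int :=
  let r := decrypt_letter c st.2
  (st.1 ++ [r.1], st.2 + r.2)

def decrypt_phrase (input_phrase : String) (xstart : Int) : String :=
  String.ofList (input_phrase.toList.foldl pvStepA ([], xstart)).1

-- ===== PORT B =====
def pvBStep (c : Char) (x : Int) : Char × Int :=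
  if 'A' ≤ c ∧ c ≤ 'Y' then
    let shift := (PySem.List.pyGet? [(11 : Int), 4, 15, 24] (PySem.Int.mod x 4)).getD 0
    (Char.ofNat (((65 : Int) + PySem.Int.mod ((c.toNat : Int) - 65 - shift) 25).toNat), 1)
  else if 'a' ≤ c ∧ c ≤ 'y' then
    let shift := (PySem.List.pyGet? [(11 : Int), 4, 15, 24] (PySem.Int.mod x 4)).getD 0
    (Char.ofNat (((97 : Int) + PySem.Int.mod ((c.toNat : Int) - 97 - shift) 25).toNat), 1)
  else (c, 0)

def pvStepB (st : List Char × Int) (c : Char) : List Char × Int :=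
  let r := pvBStep c st.2
  (st.1 ++ [r.1], st.2 + r.2)

def decrypt_phrase_alt (input_phrase : String) (xstart : Int) : String :=
  String.ofList (input_phrase.toList.foldl pvStepB ([], xstart)).1

-- ===== PRECONDITION & SPEC =====
def Spec_decrypt_phrase (input_phrase : String) (xstart : Int) (out : String) : Prop := out = decrypt_phrase_alt input_phrase xstart
instance (input_phrase : String) (xstart : Int) (out : String) : Decidable (Spec_decrypt_phrase input_phrase xstart out) := by unfold Spec_decrypt_phrase; infer_instance

-- ===== CLAIM (what is proved, stated in full; the proofs are below) =====
def Claim_equal_decrypt_phrase : Prop := ∀ (input_phrase : String) (xstart : Int), Dom_decrypt_phrase input_phrase xstart → Spec_decrypt_phrase input_phrase xstart (decrypt_phrase input_phrase xstart)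

-- ===== LEMMAS AND PROOFS =====
theorem pv_mod_idem (x : Int) : PySem.Int.mod (PySem.Int.mod x 4) 4 = PySem.Int.mod x 4 := by
  rw [PySem.Int.mod_eq_emod_of_pos (by norm_num : (0:Int) < 4),
      PySem.Int.mod_eq_emod_of_pos (by norm_num : (0:Int) < 4)]
  omega

theorem pv_mod_range (x : Int) : PySem.Int.mod x 4 = 0 ∨ PySem.Int.mod x 4 = 1 ∨ PySem.Int.mod x 4 = 2 ∨ PySem.Int.mod x 4 = 3 := by
  rw [PySem.Int.mod_eq_emod_of_pos (by norm_num : (0:Int) < 4)]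
  omega

theorem pv_dl_mod (c : Char) (x : Int) : decrypt_letter c x = decrypt_letter c (PySem.Int.mod x 4) := by
  simp only [decrypt_letter, pv_mod_idem]

theorem pv_bstep_mod (c : Char) (x : Int) : pvBStep c x = pvBStep c (PySem.Int.mod x 4) := by
  simp only [pvBStep, pv_mod_idem]

def pvCheck : Bool := (List.range 128).all fun n =>
  decide (decrypt_letter (Char.ofNat n) 0 = pvBStep (Char.ofNat n) 0) &&
  decide (decrypt_letter (Char.ofNat n) 1 = pvBStep (Char.ofNat n) 1) &&
  decide (decrypt_letter (Char.ofNat n) 2 = pvBStep (Char.ofNat n) 2) &&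
  decide (decrypt_letter (Char.ofNat n) 3 = pvBStep (Char.ofNat n) 3)

set_option maxHeartbeats 10000000 in
theorem pvCheck_true : pvCheck = true := by decide

theorem pv_letter_eq (c : Char) (hc : pvDomChar c = true) (x : Int) :
    decrypt_letter c x = pvBStep c x := by
  have hn : c.toNat < 128 := by
    simp only [pvDomChar, Bool.or_eq_true, Bool.and_eq_true, decide_eq_true_eq, beq_iff_eq] at hc
    omega
  have hce : Char.ofNat c.toNat = c := Char.ofNat_toNat c
  have h := pvCheck_true
  rw [pvCheck, List.all_eq_true] at h
  have h' := h c.toNat (List.mem_range.mpr hn)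
  rw [Bool.and_eq_true, Bool.and_eq_true, Bool.and_eq_true] at h'
  have h0 := of_decide_eq_true h'.1.1.1
  have h1 := of_decide_eq_true h'.1.1.2
  have h2 := of_decide_eq_true h'.1.2
  have h3 := of_decide_eq_true h'.2
  rw [hce] at h0 h1 h2 h3
  rw [pv_dl_mod, pv_bstep_mod]
  rcases pv_mod_range x with hm | hm | hm | hm
  · rw [hm]; exact h0
  · rw [hm]; exact h1
  · rw [hm]; exact h2
  · rw [hm]; exact h3

theorem pv_loop_eq (l : List Char) (hl : ∀ c ∈ l, pvDomChar c = true) (acc : List Char) (x : Int) :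
    l.foldl pvStepA (acc, x) = l.foldl pvStepB (acc, x) := by
  induction l generalizing acc x with
  | nil => rfl
  | cons c t ih =>
    have hstep : pvStepA (acc, x) c = pvStepB (acc, x) c := by
      simp only [pvStepA, pvStepB, pv_letter_eq c (hl c (List.mem_cons_self ..)) x]
    simp only [List.foldl_cons, hstep]
    exact ih (fun d hd => hl d (List.mem_cons_of_mem _ hd)) _ _

-- ===== VERDICT (by name: the statement is the Claim_ definition above) =====
theorem decrypt_phrase_spec : Claim_equal_decrypt_phrase := by
  intro input_phrase xstart hdom
  unfold Spec_decrypt_phrase decrypt_phrase decrypt_phrase_alt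
  have hl : ∀ c ∈ input_phrase.toList, pvDomChar c = true := by
    unfold Dom_decrypt_phrase at hdom
    simp only [Bool.and_eq_true, pvDomStr, List.all_eq_true] at hdom
    exact hdom.1
  rw [pv_loop_eq input_phrase.toList hl [] xstart]
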